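-- pv_equiv track=rewrite | github.com/JibRay/runsPlot | runsPlot.py | removeQuotesAndCommas
-- ===== SOURCE A (Python) =====
-- def removeQuotesAndCommas(inputText):
--   inQuotes = False
--   outputText = ''
--   for c in inputText:
--     if inQuotes:
--       if c == '"':
--         inQuotes = False
--       elif c != ',':
--         outputText += c
--     else:
--       if c == '"':
--         inQuotes = True
--       else:
--         outputText += c
--   return outputText
-- ===== SOURCE B (Python) =====
-- def removeQuotesAndCommas(inputText):
--   out = []
--   inside = False
--   for seg in inputText.split('"'):
--     out.append(''.join(c for c in seg if c != ',') if inside else seg)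
--     inside = not inside
--   return ''.join(out)
-- ===== Notes on version B (the rewrite author's own statement) =====
-- stated objective: idiomatic
-- what changed: Replaces the stateful per-character loop with split on the quote character into segments that alternate outside/inside quotes, keeping outside segments and comma-filtering inside segments, joined at the end.
import Mathlib
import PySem

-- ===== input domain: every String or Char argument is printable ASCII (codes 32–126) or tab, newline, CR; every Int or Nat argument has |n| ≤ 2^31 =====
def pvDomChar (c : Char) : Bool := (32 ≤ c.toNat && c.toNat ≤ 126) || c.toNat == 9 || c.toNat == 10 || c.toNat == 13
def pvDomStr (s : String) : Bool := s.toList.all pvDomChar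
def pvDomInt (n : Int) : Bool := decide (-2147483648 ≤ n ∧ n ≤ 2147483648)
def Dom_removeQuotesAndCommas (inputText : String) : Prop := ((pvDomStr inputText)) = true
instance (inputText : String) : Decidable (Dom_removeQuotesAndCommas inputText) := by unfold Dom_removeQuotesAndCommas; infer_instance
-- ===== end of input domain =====

-- B replaces A's stateful per-character loop by splitting on '"' into alternating
-- outside/inside segments, comma-filtering the inside ones (idiomatic; same cost).

-- ===== PORT A =====
def removeQuotesAndCommas (inputText : String) : String :=
  let r := inputText.toList.foldl
    (fun (st : Bool × List Char) c =>
      if st.1 then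
        if c == '"' then (false, st.2)
        else if c != ',' then (st.1, st.2 ++ [c])
        else st
      else
        if c == '"' then (true, st.2)
        else (st.1, st.2 ++ [c]))
    (false, [])
  String.ofList r.2

-- ===== PORT B =====
def removeQuotesAndCommas_alt (inputText : String) : String :=
  let r := (inputText.toList.splitOn '"').foldl
    (fun (st : List (List Char) × Bool) seg =>
      (st.1 ++ [if st.2 then seg.filter (fun c => c != ',') else seg], !st.2))
    ([], false)
  String.ofList r.1.flatten

-- ===== PRECONDITION & SPEC =====
def Spec_removeQuotesAndCommas (inputText : String) (out : String) : Prop := out = removeQuotesAndCommas_alt inputText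
instance (inputText : String) (out : String) : Decidable (Spec_removeQuotesAndCommas inputText out) := by unfold Spec_removeQuotesAndCommas; infer_instance

-- ===== CLAIM (what is proved, stated in full; the proofs are below) =====
def Claim_equal_removeQuotesAndCommas : Prop := ∀ (inputText : String), Dom_removeQuotesAndCommas inputText → Spec_removeQuotesAndCommas inputText (removeQuotesAndCommas inputText)

-- ===== LEMMAS AND PROOFS =====

-- recursive characterization of A's loop
def loopA : Bool → List Char → List Char
  | _, [] => []
  | true, c :: cs =>
      if c == '"' then loopA false cs
      else if c != ',' then c :: loopA true cs
      else loopA true cs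
  | false, c :: cs =>
      if c == '"' then loopA true cs
      else c :: loopA false cs

-- recursive characterization of B's loop over the segments
def loopB : Bool → List (List Char) → List Char
  | _, [] => []
  | q, seg :: rest => (if q then seg.filter (fun c => c != ',') else seg) ++ loopB (!q) rest

theorem foldA_eq (cs : List Char) : ∀ (q : Bool) (acc : List Char),
    (cs.foldl
      (fun (st : Bool × List Char) c =>
        if st.1 then
          if c == '"' then (false, st.2)
          else if c != ',' then (st.1, st.2 ++ [c])
          else st
        else
          if c == '"' then (true, st.2)
          else (st.1, st.2 ++ [c]))
      (q, acc)).2 = acc ++ loopA q cs := by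
  induction cs with
  | nil => intro q acc; simp [loopA]
  | cons c cs ih =>
    intro q acc
    cases q <;> by_cases h : c = '"' <;> by_cases h2 : c = ',' <;>
      simp_all [List.foldl_cons, loopA]

theorem foldB_eq (parts : List (List Char)) : ∀ (q : Bool) (acc : List (List Char)),
    ((parts.foldl
      (fun (st : List (List Char) × Bool) seg =>
        (st.1 ++ [if st.2 then seg.filter (fun c => c != ',') else seg], !st.2))
      (acc, q)).1).flatten = acc.flatten ++ loopB q parts := by
  induction parts with
  | nil => intro q acc; simp [loopB]
  | cons seg rest ih =>
    intro q acc
    simp [List.foldl_cons, loopB, ih]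

theorem loopB_splitOn (cs : List Char) : ∀ (q : Bool),
    loopB q (cs.splitOn '"') = loopA q cs := by
  induction cs with
  | nil => intro q; cases q <;> simp [List.splitOn_nil, loopB, loopA]
  | cons c cs ih =>
    intro q
    by_cases h : c = '"'
    · subst h
      rw [show ('"' :: cs).splitOn '"' = [] :: cs.splitOn '"' by
        simp [List.splitOn, List.splitOnP_cons]]
      cases q <;> simp [loopB, loopA, ih]
    · rw [show (c :: cs).splitOn '"' = (cs.splitOn '"').modifyHead (c :: ·) by
        simp [List.splitOn, List.splitOnP_cons, h]]
      obtain ⟨hd, tl, hsplit⟩ := List.exists_cons_of_ne_nil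
        (List.splitOnP_ne_nil (· == '"') cs)
      have hback := ih q
      rw [show cs.splitOn '"' = hd :: tl from hsplit] at hback ⊢
      cases q <;> by_cases h2 : c = ',' <;>
        simp_all [loopA, loopB]

-- ===== VERDICT (by name: the statement is the Claim_ definition above) =====
theorem removeQuotesAndCommas_spec : Claim_equal_removeQuotesAndCommas := by
  intro s _
  unfold Spec_removeQuotesAndCommas removeQuotesAndCommas removeQuotesAndCommas_alt
  simp only [foldA_eq, foldB_eq, List.nil_append, List.flatten_nil]
  rw [loopB_splitOn]
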